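-- pv_equiv track=rewrite | github.com/pimmie001/AdventofCode | 2021/test.py | f
-- ===== SOURCE A (Python) =====
-- def f(string):
--     y = ''
--     i = 0
--     for x in string:
--         y += x.lower() if i else x.upper()
--         if x != ' ':
--             i = 1 - i
--     return y
-- ===== SOURCE B (Python) =====
-- def f(string):
--     letters = [c for c in string if c != ' ']
--     transformed = [c.upper() if i % 2 == 0 else c.lower() for i, c in enumerate(letters)]
--     it = iter(transformed)
--     return ''.join(c if c == ' ' else next(it) for c in string)
-- ===== Notes on version B (the rewrite author's own statement) =====
-- stated objective: alternative
-- what changed: Replaces A's single fused loop with mutable case/toggle state by three separate passes: filter out spaces, case-alternate the letters by index parity, then merge them back over the original string.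
import Mathlib
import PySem

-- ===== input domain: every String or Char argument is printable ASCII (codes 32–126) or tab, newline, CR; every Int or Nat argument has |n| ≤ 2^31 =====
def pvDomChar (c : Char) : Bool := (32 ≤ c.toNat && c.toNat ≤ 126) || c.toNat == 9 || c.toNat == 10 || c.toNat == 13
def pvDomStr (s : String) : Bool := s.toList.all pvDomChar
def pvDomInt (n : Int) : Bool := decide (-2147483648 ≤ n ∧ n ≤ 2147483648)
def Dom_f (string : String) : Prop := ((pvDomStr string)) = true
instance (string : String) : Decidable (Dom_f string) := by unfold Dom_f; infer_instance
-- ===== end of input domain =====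

-- B replaces A's fused loop with mutable case/toggle state by three passes:
-- filter out spaces, case-alternate by index parity, merge back over the original string.

-- ===== PORT A =====
-- the for-loop of A: state (y, i); y grows by the cased char, i toggles on non-space
def fGoA : List Char → List Char → Int → List Char
  | [], y, _ => y
  | x :: xs, y, i =>
      fGoA xs (y ++ [if i ≠ 0 then PySem.Chars.lowerChar x else PySem.Chars.upperChar x])
        (if x ≠ ' ' then 1 - i else i)

def f (string : String) : String := String.ofList (fGoA string.toList [] 0)

-- ===== PORT B =====
-- the merge generator: spaces pass through, other positions consume the iterator
def fMerge : List Char → List Char → List Char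
  | [], _ => []
  | c :: cs, it =>
      if c = ' ' then ' ' :: fMerge cs it
      else
        match it with
        | t :: ts => t :: fMerge cs ts
        | [] => []          -- unreachable: the iterator holds one char per non-space position

def f_alt (string : String) : String :=
  let letters := string.toList.filter (fun c => c ≠ ' ')
  let transformed := (PySem.List.enumerate letters 0).map
    (fun p => if p.1 % 2 = 0 then PySem.Chars.upperChar p.2 else PySem.Chars.lowerChar p.2)
  String.ofList (fMerge string.toList transformed)

-- ===== PRECONDITION & SPEC =====
def Spec_f (string : String) (out : String) : Prop := out = f_alt string
instance (string : String) (out : String) : Decidable (Spec_f string out) := by unfold Spec_f; infer_instance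

-- ===== CLAIM (what is proved, stated in full; the proofs are below) =====
def Claim_equal_f : Prop := ∀ (string : String), Dom_f string → Spec_f string (f string)

-- ===== LEMMAS AND PROOFS =====

-- the case-alternating transform as a recursion carrying the running index
def trf : Int → List Char → List Char
  | _, [] => []
  | n, c :: cs =>
      (if n % 2 = 0 then PySem.Chars.upperChar c else PySem.Chars.lowerChar c) :: trf (n + 1) cs

theorem trf_enum (cs : List Char) : ∀ n : Int,
    (PySem.List.enumerate cs n).map
      (fun p => if p.1 % 2 = 0 then PySem.Chars.upperChar p.2 else PySem.Chars.lowerChar p.2)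
      = trf n cs := by
  induction cs with
  | nil => intro n; simp [trf, PySem.List.enumerate_nil]
  | cons c cs ih =>
      intro n
      rw [PySem.List.enumerate_cons, List.map_cons, ih]
      simp only [trf]

theorem trf_mod (cs : List Char) : ∀ n : Int, trf n cs = trf (n % 2) cs := by
  induction cs with
  | nil => intro n; simp [trf]
  | cons c cs ih =>
      intro n
      have h1 : (n % 2) % 2 = n % 2 := by omega
      have h2 : (n + 1) % 2 = (n % 2 + 1) % 2 := by omega
      simp only [trf, h1]
      rw [ih (n + 1), ih (n % 2 + 1), h2]

theorem fGoA_merge : ∀ (xs y : List Char) (i : Int), (i = 0 ∨ i = 1) →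
    fGoA xs y i = y ++ fMerge xs (trf i (xs.filter (fun c => c ≠ ' '))) := by
  intro xs
  induction xs with
  | nil => intro y i _; simp [fGoA, fMerge]
  | cons x xs ih =>
      intro y i hi
      by_cases hx : x = ' '
      · subst hx
        have hc : (if i ≠ 0 then PySem.Chars.lowerChar ' ' else PySem.Chars.upperChar ' ') = ' ' := by
          rcases hi with h | h <;> subst h <;> decide
        have hfil : (' ' :: xs).filter (fun c => c ≠ ' ') = xs.filter (fun c => c ≠ ' ') := by
          simp [List.filter]
        simp only [fGoA, fMerge, hc, hfil]
        norm_num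
        rw [ih (y ++ [' ']) i hi]
        simp
      · have hfil : (x :: xs).filter (fun c => c ≠ ' ') = x :: xs.filter (fun c => c ≠ ' ') := by
          simp [List.filter, hx]
        rcases hi with h | h <;> subst h
        · simp only [fGoA, fMerge, hfil, trf, if_pos hx, if_neg (by trivial)]
          norm_num
          rw [ih (y ++ [PySem.Chars.upperChar x]) 1 (Or.inr rfl)]
          simp
        · simp only [fGoA, fMerge, hfil, trf, if_neg hx, if_pos hx]
          norm_num
          rw [trf_mod _ 2]
          norm_num
          rw [ih (y ++ [PySem.Chars.lowerChar x]) 0 (Or.inl rfl)]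
          simp

-- ===== VERDICT (by name: the statement is the Claim_ definition above) =====
theorem f_spec : Claim_equal_f := by
  intro s _
  unfold Spec_f f
  simp only [f_alt]
  rw [fGoA_merge s.toList [] 0 (Or.inl rfl), trf_enum]
  simp
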